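-- pv_equiv track=rewrite | github.com/tpalko/budget-badger | budget/4.0.5/budget/web/util/stats.py | _get_largest_values_bin
-- ===== SOURCE A (Python) =====
-- def _get_largest_values_bin(hist):
--     bincount = None
--     na = list(hist)
--     if all([ v == 0 for v in na ]):
--         return None
--
--     bin_index = len(hist) - 1
--
--     while True:
--         bincount = na.pop()
--         if bincount > 0 or bin_index == 0:
--             break
--         bin_index -= 1
--
--     return bin_index
-- ===== SOURCE B (Python) =====
-- def _get_largest_values_bin(hist):
--     if all(v == 0 for v in hist):
--         return None
--     pos = [i for i, v in enumerate(hist) if v > 0]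
--     return pos[-1] if pos else 0
-- ===== Notes on version B (the rewrite author's own statement) =====
-- stated objective: simpler
-- what changed: Replaced the backward destructive pop/early-exit while-loop with a forward scan that collects the indices of positive bins and returns the last one (0 if none).
import Mathlib
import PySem

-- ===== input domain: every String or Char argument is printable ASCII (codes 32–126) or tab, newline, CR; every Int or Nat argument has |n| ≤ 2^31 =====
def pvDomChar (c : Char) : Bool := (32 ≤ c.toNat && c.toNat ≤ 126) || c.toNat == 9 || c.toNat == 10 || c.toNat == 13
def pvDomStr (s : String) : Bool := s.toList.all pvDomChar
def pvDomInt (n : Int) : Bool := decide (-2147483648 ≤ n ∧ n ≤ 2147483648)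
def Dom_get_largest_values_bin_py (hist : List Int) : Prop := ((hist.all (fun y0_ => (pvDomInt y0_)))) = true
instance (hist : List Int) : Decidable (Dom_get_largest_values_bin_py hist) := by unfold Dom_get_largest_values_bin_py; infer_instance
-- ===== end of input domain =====

-- B replaces A's backward destructive pop loop with a forward scan collecting positive indices (simpler decomposition; return value only).

-- ===== PORT A =====
-- the while-True loop: na.pop() is the head of the reversed remainder; break when bincount > 0 or bin_index == 0
def pvLoopA : List Int → Int → Int
  | [], bi => bi          -- unreachable in A (pop on empty never happens before the break)
  | bincount :: rest, bi => if bincount > 0 ∨ bi = 0 then bi else pvLoopA rest (bi - 1)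

def get_largest_values_bin_py (hist : List Int) : Option Int :=
  if hist.all (fun v => v == 0) then none
  else some (pvLoopA hist.reverse ((hist.length : Int) - 1))

-- ===== PORT B =====
def get_largest_values_bin_py_alt (hist : List Int) : Option Int :=
  if hist.all (fun v => v == 0) then none
  else
    let pos := ((PySem.List.enumerate hist).filter (fun p => decide (0 < p.2))).map (fun p => p.1)
    some (pos.getLast?.getD 0)

-- ===== PRECONDITION & SPEC =====
def Spec_get_largest_values_bin_py (hist : List Int) (out : Option Int) : Prop := out = get_largest_values_bin_py_alt hist
instance (hist : List Int) (out : Option Int) : Decidable (Spec_get_largest_values_bin_py hist out) := by unfold Spec_get_largest_values_bin_py; infer_instance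

-- ===== CLAIM (what is proved, stated in full; the proofs are below) =====
def Claim_equal_get_largest_values_bin_py : Prop := ∀ (hist : List Int), Dom_get_largest_values_bin_py hist → Spec_get_largest_values_bin_py hist (get_largest_values_bin_py hist)

-- ===== LEMMAS AND PROOFS =====

-- B's core value as a function, for induction from the right
def pvPosLast (hist : List Int) : Int :=
  ((((PySem.List.enumerate hist).filter (fun p => decide (0 < p.2))).map (fun p => p.1)).getLast?).getD 0

theorem pvEnumerate_snoc (xs : List Int) (x : Int) (s : Int) :
    PySem.List.enumerate (xs ++ [x]) s
      = PySem.List.enumerate xs s ++ [(s + xs.length, x)] := by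
  rw [PySem.List.enumerate_append]
  simp [PySem.List.enumerate]

theorem pvPosLast_snoc (xs : List Int) (x : Int) :
    pvPosLast (xs ++ [x]) = if 0 < x then (xs.length : Int) else pvPosLast xs := by
  unfold pvPosLast
  rw [pvEnumerate_snoc, List.filter_append, List.map_append]
  by_cases hx : 0 < x
  · simp [hx]
  · simp [hx]

theorem pvLoop_eq (hist : List Int) (h : hist ≠ []) :
    pvLoopA hist.reverse ((hist.length : Int) - 1) = pvPosLast hist := by
  induction hist using List.reverseRecOn with
  | nil => cases h rfl
  | append_singleton xs x ih =>
    rw [pvPosLast_snoc, List.reverse_append, List.reverse_singleton]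
    simp only [List.singleton_append, List.length_append, List.length_singleton]
    show pvLoopA (x :: xs.reverse) _ = _
    unfold pvLoopA
    by_cases hx : 0 < x
    · rw [if_pos (Or.inl hx), if_pos hx]
      push_cast; ring
    · rw [if_neg hx]
      cases xs with
      | nil => simp [pvPosLast, PySem.List.enumerate]
      | cons y ys =>
        rw [if_neg (by push_cast; simp [hx]; omega)]
        have := ih (by simp)
        convert this using 2
        push_cast; ring

theorem pvAllZero_ne_nil (hist : List Int) (h : ¬ hist.all (fun v => v == 0) = true) : hist ≠ [] := by
  intro he; subst he; simp at h

-- ===== VERDICT (by name: the statement is the Claim_ definition above) =====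
theorem get_largest_values_bin_py_spec : Claim_equal_get_largest_values_bin_py := by
  intro hist _
  unfold Spec_get_largest_values_bin_py get_largest_values_bin_py get_largest_values_bin_py_alt
  by_cases hz : hist.all (fun v => v == 0) = true
  · simp [hz]
  · simp only [hz, if_neg, Bool.false_eq_true, not_false_eq_true]
    rw [pvLoop_eq hist (pvAllZero_ne_nil hist hz)]
    rfl
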